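-- pv_equiv track=rewrite | github.com/XiaoWenZz/PipeSFL_Corr | try_new/CIFAR_corr_constant_alpha.py | dataset_iid
-- ===== SOURCE A (Python) =====
-- def dataset_iid(dataset, num_users):
--     labels = [label for _, label in dataset]
--     class_idxs = {i: [] for i in range(10)}
--     for idx, label in enumerate(labels):
--         class_idxs[label].append(idx)
--
--     dict_users = {}
--     num_per_class = len(class_idxs[0]) // num_users
--
--     for user in range(num_users):
--         dict_users[user] = set()
--         for class_idx in class_idxs:
--             start = user * num_per_class
--             end = (user + 1) * num_per_class
--             dict_users[user].update(class_idxs[class_idx][start:end])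
--
--     return dict_users
-- ===== SOURCE B (Python) =====
-- def dataset_iid(dataset, num_users):
--     # sort-then-scan: stable-sort the sample indices by class label, then assign
--     # each sample by its within-class rank (rank // num_per_class = user), instead
--     # of building per-class index buckets and slicing them per user.
--     num_per_class = sum(1 for _, label in dataset if label == 0) // num_users
--     dict_users = {user: set() for user in range(num_users)}
--     rank = 0
--     prev = None
--     for idx, (_, label) in sorted(enumerate(dataset), key=lambda p: p[1][1]):
--         if label != prev:
--             rank = 0
--             prev = label
--         if num_per_class > 0:
--             user = rank // num_per_class
--             if user < num_users:
--                 dict_users[user].add(idx)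
--         rank += 1
--     return dict_users
-- ===== Notes on version B (the rewrite author's own statement) =====
-- stated objective: alternative
-- what changed: A builds a per-class dict of index buckets and then slices each bucket per user with index arithmetic; B never builds buckets: it counts class-0 samples for num_per_class, stably sorts the enumerated samples by label, and assigns each sample in one scan by its within-class rank (user = rank // num_per_class), a sort-then-scan algorithm.
import Mathlib
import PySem

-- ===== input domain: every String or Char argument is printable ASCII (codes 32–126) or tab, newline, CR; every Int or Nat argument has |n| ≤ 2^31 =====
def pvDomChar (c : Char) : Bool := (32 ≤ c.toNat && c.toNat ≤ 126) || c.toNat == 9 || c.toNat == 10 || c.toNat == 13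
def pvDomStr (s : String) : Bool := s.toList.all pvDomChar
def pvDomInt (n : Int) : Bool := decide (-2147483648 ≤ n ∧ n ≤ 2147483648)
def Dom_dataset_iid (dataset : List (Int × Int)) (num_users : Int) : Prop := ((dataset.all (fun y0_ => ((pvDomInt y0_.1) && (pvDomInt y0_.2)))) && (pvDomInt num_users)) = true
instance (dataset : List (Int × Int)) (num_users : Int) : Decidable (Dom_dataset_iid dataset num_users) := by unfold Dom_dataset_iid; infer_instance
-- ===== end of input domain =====

-- B replaces A's bucket-build-then-slice (per-class index lists sliced per user) by
-- sort-then-scan: count class-0 samples, stably sort the enumerated samples by label,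
-- and assign each sample by its within-class rank; objective: alternative algorithm.

-- ===== PORT A =====
def dataset_iid (dataset : List (Int × Int)) (num_users : Int) : List (Int × List Int) :=
  let labels : List Int := dataset.map (fun p => p.2)
  let classIdxs0 : PySem.Dict Int (List Int) :=
    (PySem.List.pyRange 0 10 1).foldl (fun d i => d.insert i ([] : List Int)) PySem.Dict.empty
  let classIdxs : PySem.Dict Int (List Int) :=
    (PySem.List.enumerate labels 0).foldl (fun d p =>
      match d.get? p.2 with
      | some l => d.insert p.2 (l ++ [p.1])   -- class_idxs[label].append(idx)
      | none   => d)                          -- Python raises KeyError here; excluded by Pre_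
      classIdxs0
  -- len(class_idxs[0]): key 0 is always present, so getD is exact
  let numPerClass : Int := PySem.Int.floordiv ((classIdxs.getD 0 []).length : Int) num_users
  let dictUsers : PySem.Dict Int (PySem.Set Int) :=
    (PySem.List.pyRange 0 num_users 1).foldl (fun du user =>
      let du' := du.insert user (PySem.Set.empty)
      -- dict_users[user] and class_idxs[class_idx]: both keys present, so getD is exact
      classIdxs.keys.foldl (fun du c =>
        du.insert user (PySem.Set.update (du.getD user [])
          (PySem.List.slice (classIdxs.getD c []) (some (user * numPerClass)) (some ((user + 1) * numPerClass)))))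
        du')
      PySem.Dict.empty
  dictUsers.items

-- ===== PORT B =====
def dataset_iid_alt (dataset : List (Int × Int)) (num_users : Int) : List (Int × List Int) :=
  -- num_per_class = sum(1 for _, label in dataset if label == 0) // num_users
  let numPerClass : Int :=
    PySem.Int.floordiv (dataset.foldl (fun acc p => if p.2 == 0 then acc + 1 else acc) (0 : Int)) num_users
  -- dict_users = {user: set() for user in range(num_users)}
  let dictUsers0 : PySem.Dict Int (PySem.Set Int) :=
    (PySem.List.pyRange 0 num_users 1).foldl (fun d u => d.insert u PySem.Set.empty) PySem.Dict.empty
  -- for idx, (_, label) in sorted(enumerate(dataset), key=lambda p: p[1][1]): …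
  -- state = (dict_users, rank, prev); dict_users[user] present whenever user < num_users, so getD is exact
  let final :=
    (PySem.List.sorted (PySem.List.enumerate dataset 0) (fun p => p.2.2) false).foldl
      (fun st p =>
        let rp := if st.2.2 ≠ some p.2.2 then ((0 : Int), some p.2.2) else (st.2.1, st.2.2)
        let du :=
          if 0 < numPerClass then
            let user := PySem.Int.floordiv rp.1 numPerClass
            if user < num_users then st.1.insert user (PySem.Set.add (st.1.getD user []) p.1) else st.1
          else st.1
        (du, rp.1 + 1, rp.2))
      (dictUsers0, (0 : Int), (none : Option Int))
  final.1.items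

-- ===== PRECONDITION & SPEC =====
-- Pre_ excludes exactly the inputs on which Python A raises: a label outside range(10)
-- (KeyError on the bucket append) or num_users = 0 (ZeroDivisionError at the floor division).
def Pre_dataset_iid (dataset : List (Int × Int)) (num_users : Int) : Prop :=
  (∀ p ∈ dataset, 0 ≤ p.2 ∧ p.2 < 10) ∧ num_users ≠ 0
instance (dataset : List (Int × Int)) (num_users : Int) : Decidable (Pre_dataset_iid dataset num_users) := by unfold Pre_dataset_iid; infer_instance

def pvWitness_dataset_iid : (List (Int × Int)) × Int := ([(5, 0), (7, 1), (3, 0), (9, 1)], 2)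

def Spec_dataset_iid (dataset : List (Int × Int)) (num_users : Int) (out : List (Int × List Int)) : Prop := out = dataset_iid_alt dataset num_users
instance (dataset : List (Int × Int)) (num_users : Int) (out : List (Int × List Int)) : Decidable (Spec_dataset_iid dataset num_users out) := by unfold Spec_dataset_iid; infer_instance

-- ===== CLAIM (what is proved, stated in full; the proofs are below) =====
def Claim_equal_dataset_iid : Prop := ∀ (dataset : List (Int × Int)) (num_users : Int), Dom_dataset_iid dataset num_users → Pre_dataset_iid dataset num_users → Spec_dataset_iid dataset num_users (dataset_iid dataset num_users)

-- ===== LEMMAS AND PROOFS =====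

-- B's loop body, named for the proofs (definitionally the lambda in dataset_iid_alt)
def pvBStep (npc nu : Int) (st : PySem.Dict Int (PySem.Set Int) × Int × Option Int)
    (p : Int × (Int × Int)) : PySem.Dict Int (PySem.Set Int) × Int × Option Int :=
  let rp := if st.2.2 ≠ some p.2.2 then ((0 : Int), some p.2.2) else (st.2.1, st.2.2)
  let du :=
    if 0 < npc then
      let user := PySem.Int.floordiv rp.1 npc
      if user < nu then st.1.insert user (PySem.Set.add (st.1.getD user []) p.1) else st.1
    else st.1
  (du, rp.1 + 1, rp.2)

-- the dict {0: g 0, …, U-1: g (U-1)}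
def pvMkD (U : Nat) (g : Nat → PySem.Set Int) : PySem.Dict Int (PySem.Set Int) :=
  (List.range U).foldl (fun d (k : Nat) => d.insert (k : Int) (g k)) PySem.Dict.empty

-- which indices of a class bucket (scanned with ranks r, r+1, …) user u receives
def pvSel (m U : Nat) : List (Int × (Int × Int)) → Nat → Nat → List Int
  | [], _, _ => []
  | y :: t, r, u => (if 0 < m ∧ r / m = u ∧ u < U then [y.1] else []) ++ pvSel m U t (r + 1) u

-- enumerate(map f xs) = map over enumerate(xs)
theorem pv_enumerate_map {α β : Type} (f : α → β) (xs : List α) (s : Int) :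
    PySem.List.enumerate (xs.map f) s = (PySem.List.enumerate xs s).map (fun p => (p.1, f p.2)) := by
  induction xs generalizing s with
  | nil => simp [PySem.List.enumerate_nil]
  | cons x xs ih => simp [PySem.List.enumerate_cons, ih]

-- second components of enumerate are the list's elements
theorem pv_mem_enumerate {α : Type} (xs : List α) (s : Int) (p : Int × α)
    (h : p ∈ PySem.List.enumerate xs s) : p.2 ∈ xs := by
  induction xs generalizing s with
  | nil => simp [PySem.List.enumerate_nil] at h
  | cons x xs ih =>
      rw [PySem.List.enumerate_cons] at h
      rcases List.mem_cons.mp h with h | h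
      · simp [h]
      · exact List.mem_cons_of_mem _ (ih (s + 1) h)

-- the bucket-append fold never changes the key set
theorem pv_keys_append_fold (l : List (Int × (Int × Int)))
    (d : PySem.Dict Int (List Int)) :
    (l.foldl (fun d p =>
        match d.get? p.2.2 with
        | some v => d.insert p.2.2 (v ++ [p.1])
        | none   => d) d).keys = d.keys := by
  induction l generalizing d with
  | nil => rfl
  | cons p l ih =>
      rcases h : d.get? p.2.2 with _ | v
      · simp only [List.foldl_cons, h]; exact ih d
      · simp only [List.foldl_cons, h]
        rw [ih, PySem.Dict.keys_insert_of_contains]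
        rw [PySem.Dict.contains_eq_isSome_get?, h]; rfl

-- the bucket-append fold, value at a class key
theorem pv_getD_append_fold (l : List (Int × (Int × Int)))
    (d : PySem.Dict Int (List Int)) (c : Int)
    (h : ∀ p ∈ l, d.contains p.2.2 = true) :
    (l.foldl (fun d p =>
        match d.get? p.2.2 with
        | some v => d.insert p.2.2 (v ++ [p.1])
        | none   => d) d).getD c []
      = d.getD c [] ++ (l.filter (fun p => p.2.2 == c)).map (fun p => p.1) := by
  induction l generalizing d with
  | nil => simp
  | cons p l ih =>
      have hc := h p (List.mem_cons_self ..)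
      rw [PySem.Dict.contains_eq_isSome_get?] at hc
      rcases hg : d.get? p.2.2 with _ | v
      · rw [hg] at hc; simp at hc
      · simp only [List.foldl_cons, hg]
        rw [ih _ (fun q hq => by
          rw [PySem.Dict.contains_insert]
          rcases eq_or_ne q.2.2 p.2.2 with he | he
          · simp [he]
          · simp only [Bool.or_eq_true, beq_iff_eq]
            exact Or.inr (h q (List.mem_cons_of_mem _ hq)))]
        rw [PySem.Dict.getD_insert]
        rcases eq_or_ne c p.2.2 with he | he
        · subst he
          rw [if_pos rfl, List.filter_cons_of_pos (by simp)]
          rw [PySem.Dict.getD_eq_get?_getD, hg]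
          simp
        · rw [if_neg he, List.filter_cons_of_neg (by simpa using fun h' => he h'.symm)]
  -- keys untouched elsewhere

-- every value of the all-empty init dict reads as []
theorem pv_getD_init (ks : List Int) (d : PySem.Dict Int (List Int))
    (h : ∀ c, d.getD c [] = []) (c : Int) :
    (ks.foldl (fun d i => d.insert i ([] : List Int)) d).getD c [] = [] := by
  induction ks generalizing d with
  | nil => exact h c
  | cons k ks ih =>
      simp only [List.foldl_cons]
      refine ih _ (fun c' => ?_)
      rw [PySem.Dict.getD_insert]
      split_ifs with h' <;> simp [h]

-- A's inner class loop collapses to a single insert of the folded set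
theorem pv_inner_collapse (l : List Int) (du : PySem.Dict Int (PySem.Set Int))
    (user : Int) (s : PySem.Set Int) (f : Int → List Int) :
    l.foldl (fun du c => du.insert user (PySem.Set.update (du.getD user []) (f c)))
        (du.insert user s)
      = du.insert user (l.foldl (fun s c => PySem.Set.update s (f c)) s) := by
  induction l generalizing s with
  | nil => rfl
  | cons c l ih =>
      simp only [List.foldl_cons]
      rw [PySem.Dict.getD_insert, if_pos rfl, PySem.Dict.insert_insert_self, ih]

-- a Python slice [u*npc : (u+1)*npc] with 0 ≤ npc is drop-then-take
theorem pv_slice_chunk (xs : List Int) (k : Nat) (npc : Int) (h : 0 ≤ npc) :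
    PySem.List.slice xs (some ((k : Int) * npc)) (some (((k : Int) + 1) * npc))
      = (xs.drop (k * npc.toNat)).take npc.toNat := by
  obtain ⟨m, rfl⟩ : ∃ m : Nat, npc = (m : Int) := ⟨npc.toNat, (Int.toNat_of_nonneg h).symm⟩
  have h1 : (k : Int) * (m : Int) = ((k * m : Nat) : Int) := by push_cast; ring
  have h2 : ((k : Int) + 1) * (m : Int) = (((k + 1) * m : Nat) : Int) := by push_cast; ring
  rw [h1, h2, PySem.List.slice_natCast]
  have h3 : (k + 1) * m - k * m = m := by rw [Nat.succ_mul]; omega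
  simp [h3]

-- ----- stability of Python's sort: sorted-by-key is the concatenation of the key buckets -----

theorem pv_insertBy_pass {α : Type} (before : α → α → Bool) (x : α) (l r : List α)
    (h : ∀ y ∈ l, before x y = false) :
    PySem.List.insertBy before x (l ++ r) = l ++ PySem.List.insertBy before x r := by
  induction l with
  | nil => simp
  | cons y l ih =>
      simp only [List.cons_append, PySem.List.insertBy, h y (List.mem_cons_self ..)]
      simp [ih (fun z hz => h z (List.mem_cons_of_mem _ hz))]

theorem pv_insertBy_head {α : Type} (before : α → α → Bool) (x : α) (r : List α)
    (h : ∀ y ∈ r, before x y = true) :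
    PySem.List.insertBy before x r = x :: r := by
  cases r with
  | nil => rfl
  | cons y t => simp [PySem.List.insertBy, h y (List.mem_cons_self ..)]

theorem pv_insertBy_buckets {α : Type} (key : α → Int) (cs : List Int) (x : α)
    (f : Int → List α) (hcs : cs.Pairwise (· < ·)) (hmem : key x ∈ cs)
    (hf : ∀ c ∈ cs, ∀ y ∈ f c, key y = c) :
    PySem.List.insertBy (fun a b => decide (key a < key b)) x (cs.flatMap f)
      = cs.flatMap (fun c => if c = key x then f c ++ [x] else f c) := by
  induction cs with
  | nil => simp at hmem
  | cons c cs ih =>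
      rw [List.pairwise_cons] at hcs
      rcases eq_or_ne c (key x) with he | he
      · rw [List.flatMap_cons, List.flatMap_cons, if_pos he,
          pv_insertBy_pass _ _ _ _ (fun y hy => by
            rw [decide_eq_false_iff_not, hf c (List.mem_cons_self ..) y hy, he]
            exact lt_irrefl _),
          pv_insertBy_head _ _ _ (fun y hy => by
            rcases List.mem_flatMap.mp hy with ⟨c', hc', hy'⟩
            rw [decide_eq_true_eq, hf c' (List.mem_cons_of_mem _ hc') y hy', ← he]
            exact hcs.1 c' hc')]
        have hmm : cs.flatMap (fun c' => if c' = key x then f c' ++ [x] else f c')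
            = cs.flatMap f := List.flatMap_congr (fun c' hc' => by
          rw [if_neg (fun hx => absurd (he ▸ hcs.1 c' hc') (by rw [hx]; exact lt_irrefl _))])
        rw [hmm, List.append_assoc]
        rfl
      · have hmem' : key x ∈ cs := by
          rcases List.mem_cons.mp hmem with h | h
          · exact absurd h.symm he
          · exact h
        have hcx : c < key x := hcs.1 (key x) hmem'
        rw [List.flatMap_cons, List.flatMap_cons, if_neg he,
          pv_insertBy_pass _ _ _ _ (fun y hy => by
            rw [decide_eq_false_iff_not, hf c (List.mem_cons_self ..) y hy]
            omega),
          ih hcs.2 hmem' (fun c' hc' => hf c' (List.mem_cons_of_mem _ hc'))]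

theorem pv_sorted_eq_flatMap {α : Type} (key : α → Int) (cs : List Int)
    (hcs : cs.Pairwise (· < ·)) (xs : List α) (hxs : ∀ x ∈ xs, key x ∈ cs) :
    PySem.List.sorted xs key false = cs.flatMap (fun c => xs.filter (fun x => key x == c)) := by
  induction xs using List.reverseRecOn with
  | nil =>
      rw [show PySem.List.sorted ([] : List α) key false = [] from rfl]
      exact (List.flatMap_eq_nil_iff.mpr (by simp)).symm
  | append_singleton xs x ih =>
      rw [PySem.List.sorted_eq_foldl_insertBy, List.foldl_append, List.foldl_cons, List.foldl_nil,
        ← PySem.List.sorted_eq_foldl_insertBy,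
        ih (fun y hy => hxs y (List.mem_append_left _ hy)),
        pv_insertBy_buckets key cs x _ hcs (hxs x (by simp)) (fun c hc y hy => by
          have := List.mem_filter.mp hy
          exact beq_iff_eq.mp this.2)]
      refine List.flatMap_congr (fun c hc => ?_)
      rw [List.filter_append]
      rcases eq_or_ne c (key x) with he | he
      · subst he; simp
      · rw [if_neg he]
        simp [beq_iff_eq, Ne.symm he]

-- ----- the pvMkD dictionary -----

theorem pv_items_mkD (U : Nat) (g : Nat → PySem.Set Int) :
    (pvMkD U g).items = (List.range U).map (fun (k : Nat) => ((k : Int), g k)) := by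
  unfold pvMkD
  have h := PySem.Dict.items_foldl_insert_fresh (List.range U)
    (fun k : Nat => (k : Int)) g PySem.Dict.empty
    (fun a _ => PySem.Dict.contains_empty _)
    (List.Nodup.map (fun a b h => Int.natCast_inj.mp h) List.nodup_range)
  simpa using h

theorem pv_mkD_congr (U : Nat) (g h : Nat → PySem.Set Int)
    (hgh : ∀ k < U, g k = h k) : pvMkD U g = pvMkD U h := by
  apply PySem.Dict.ext
  rw [pv_items_mkD, pv_items_mkD]
  exact List.map_congr_left (fun k hk => by rw [hgh k (List.mem_range.mp hk)])

theorem pv_keys_mkD (U : Nat) (g : Nat → PySem.Set Int) :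
    (pvMkD U g).keys = (List.range U).map (fun k : Nat => (k : Int)) := by
  have h : (pvMkD U g).keys = (pvMkD U g).items.map (fun p => p.1) := rfl
  rw [h, pv_items_mkD, List.map_map]; rfl

theorem pv_nodup_keys_mkD (U : Nat) (g : Nat → PySem.Set Int) : (pvMkD U g).keys.Nodup := by
  rw [pv_keys_mkD]
  exact List.Nodup.map (fun a b h => Int.natCast_inj.mp h) List.nodup_range

theorem pv_getD_mkD (U : Nat) (g : Nat → PySem.Set Int) (u : Nat) (hu : u < U) :
    (pvMkD U g).getD (u : Int) [] = g u := by
  refine PySem.Dict.getD_of_mem_items _ ?_ (pv_nodup_keys_mkD U g) []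
  rw [pv_items_mkD]
  exact List.mem_map.mpr ⟨u, List.mem_range.mpr hu, rfl⟩

theorem pv_contains_mkD (U : Nat) (g : Nat → PySem.Set Int) (u : Nat) (hu : u < U) :
    (pvMkD U g).contains (u : Int) = true := by
  rw [PySem.Dict.contains_iff_mem_keys, pv_keys_mkD]
  exact List.mem_map.mpr ⟨u, List.mem_range.mpr hu, rfl⟩

theorem pv_insert_mkD (U : Nat) (g : Nat → PySem.Set Int) (u : Nat) (hu : u < U)
    (v : PySem.Set Int) :
    (pvMkD U g).insert (u : Int) v = pvMkD U (fun k => if k = u then v else g k) := by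
  apply PySem.Dict.ext
  rw [PySem.Dict.items_insert_of_contains _ v (pv_contains_mkD U g u hu),
    pv_items_mkD, pv_items_mkD, List.map_map]
  refine List.map_congr_left (fun k _ => ?_)
  simp only [Function.comp_apply, beq_iff_eq]
  rcases eq_or_ne k u with he | he
  · subst he; simp
  · simp [he]

-- ----- B's scan, characterised -----

-- one step inside a class bucket (prev already the current class): no reset fires
theorem pv_bstep_eq (npc nu : Int) (d : PySem.Dict Int (PySem.Set Int)) (r : Int) (c : Int)
    (y : Int × (Int × Int)) (hy : y.2.2 = c) :
    pvBStep npc nu (d, r, some c) y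
      = (if 0 < npc then
           (if PySem.Int.floordiv r npc < nu then
              d.insert (PySem.Int.floordiv r npc)
                (PySem.Set.add (d.getD (PySem.Int.floordiv r npc) []) y.1)
            else d)
         else d, r + 1, some c) := by
  simp [pvBStep, hy]

-- a whole class bucket (labels all c, prev already c): ranks advance, user u collects pvSel
theorem pv_scan_bucket (npc nu : Int) (m U : Nat) (hm : npc = (m : Int)) (hU : nu = (U : Int))
    (c : Int) (l : List (Int × (Int × Int))) (hl : ∀ p ∈ l, p.2.2 = c)
    (g : Nat → PySem.Set Int) (r : Nat) :
    l.foldl (pvBStep npc nu) (pvMkD U g, (r : Int), some c)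
      = (pvMkD U (fun u => PySem.Set.update (g u) (pvSel m U l r u)),
          ((r + l.length : Nat) : Int), some c) := by
  induction l generalizing g r with
  | nil =>
      simp only [List.foldl_nil, pvSel, List.length_nil, Nat.add_zero]
      exact congrArg (fun d => (d, ((r : Nat) : Int), some c))
        (pv_mkD_congr U _ _ (fun k _ => rfl)).symm
  | cons y t ih =>
      have hy : y.2.2 = c := hl y (List.mem_cons_self ..)
      simp only [List.foldl_cons]
      rw [pv_bstep_eq npc nu _ _ c y hy]
      have hlen : ((r : Int) + 1) = (((r + 1 : Nat)) : Int) := by push_cast; ring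
      have hlen2 : ((r + (y :: t).length : Nat) : Int) = (((r + 1) + t.length : Nat) : Int) := by
        simp only [List.length_cons]; push_cast; ring
      by_cases hpos : 0 < npc
      · have hm' : 0 < m := by
          rw [hm] at hpos; exact_mod_cast hpos
        have hdiv : PySem.Int.floordiv ((r : Nat) : Int) npc = ((r / m : Nat) : Int) := by
          rw [hm, PySem.Int.floordiv_eq_ediv_of_pos (by exact_mod_cast hm')]
          exact_mod_cast (Int.natCast_div r m).symm
        rw [if_pos hpos, hdiv]
        by_cases hlt : ((r / m : Nat) : Int) < nu
        · have hrU : r / m < U := by rw [hU] at hlt; exact_mod_cast hlt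
          rw [if_pos hlt, pv_getD_mkD U g _ hrU, pv_insert_mkD U g _ hrU, hlen,
            ih (fun p hp => hl p (List.mem_cons_of_mem _ hp)) _ (r + 1), hlen2]
          refine congrArg (fun d => (d, (((r + 1) + t.length : Nat) : Int), some c)) ?_
          apply pv_mkD_congr
          intro k hk
          rcases eq_or_ne k (r / m) with he | he
          · subst he
            rw [if_pos rfl]
            simp only [pvSel]
            split_ifs with hcnd
            · rfl
            · exact absurd ⟨hm', by simp, hrU⟩ hcnd
          · rw [if_neg he]
            simp only [pvSel]
            split_ifs with hcnd
            · exact absurd hcnd.2.1.symm he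
            · rfl
        · rw [if_neg hlt, hlen,
            ih (fun p hp => hl p (List.mem_cons_of_mem _ hp)) g (r + 1), hlen2]
          refine congrArg (fun d => (d, (((r + 1) + t.length : Nat) : Int), some c)) ?_
          apply pv_mkD_congr
          intro k hk
          simp only [pvSel]
          split_ifs with hcnd
          · exfalso
            rcases hcnd with ⟨h1, h2, h3⟩
            rw [← h2] at h3
            exact hlt (by rw [hU]; exact_mod_cast h3)
          · rfl
      · rw [if_neg hpos, hlen,
          ih (fun p hp => hl p (List.mem_cons_of_mem _ hp)) g (r + 1), hlen2]
        refine congrArg (fun d => (d, (((r + 1) + t.length : Nat) : Int), some c)) ?_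
        apply pv_mkD_congr
        intro k hk
        simp only [pvSel]
        split_ifs with hcnd
        · exact absurd (by rw [hm]; exact_mod_cast hcnd.1 : 0 < npc) hpos
        · rfl

-- if the class changes, the first step behaves as after a rank/prev reset
theorem pv_scan_reset (npc nu : Int) (l : List (Int × (Int × Int))) (c : Int)
    (hne : l ≠ []) (hl : ∀ p ∈ l, p.2.2 = c)
    (d : PySem.Dict Int (PySem.Set Int)) (r0 : Int) (p0 : Option Int) (hp : p0 ≠ some c) :
    l.foldl (pvBStep npc nu) (d, r0, p0) = l.foldl (pvBStep npc nu) (d, 0, some c) := by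
  cases l with
  | nil => exact absurd rfl hne
  | cons y t =>
      have hy : y.2.2 = c := hl y (List.mem_cons_self ..)
      simp only [List.foldl_cons]
      congr 1
      simp [pvBStep, hy, hp]

-- the whole sorted scan over the concatenated class buckets
theorem pv_scan_classes (npc nu : Int) (m U : Nat) (hm : npc = (m : Int)) (hU : nu = (U : Int))
    (cs : List Int) (F : Int → List (Int × (Int × Int)))
    (hF : ∀ c, ∀ p ∈ F c, p.2.2 = c) (hcs : cs.Pairwise (· < ·))
    (g : Nat → PySem.Set Int) (r0 : Int) (p0 : Option Int) (hp0 : ∀ c ∈ cs, p0 ≠ some c) :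
    ((cs.flatMap F).foldl (pvBStep npc nu) (pvMkD U g, r0, p0)).1
      = pvMkD U (fun u => cs.foldl (fun s c => PySem.Set.update s (pvSel m U (F c) 0 u)) (g u)) := by
  induction cs generalizing g r0 p0 with
  | nil => simp only [List.flatMap_nil, List.foldl_nil]
  | cons c cs ih =>
      rw [List.pairwise_cons] at hcs
      rw [List.flatMap_cons, List.foldl_append]
      rcases eq_or_ne (F c) [] with he | he
      · rw [he, List.foldl_nil,
          ih hcs.2 g r0 p0 (fun c' hc' => hp0 c' (List.mem_cons_of_mem _ hc'))]
        apply pv_mkD_congr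
        intro k _
        simp only [List.foldl_cons, he, pvSel]
        rfl
      · rw [pv_scan_reset npc nu (F c) c he (hF c) _ r0 p0 (hp0 c (List.mem_cons_self ..))]
        have h0 : ((0 : Nat) : Int) = (0 : Int) := rfl
        rw [← h0, pv_scan_bucket npc nu m U hm hU c (F c) (hF c) g 0]
        rw [ih hcs.2 _ _ _ (fun c' hc' => by
          simp only [ne_eq, Option.some.injEq]
          exact fun h => absurd (h ▸ hcs.1 c' hc') (lt_irrefl _))]
        apply pv_mkD_congr
        intro k _
        simp only [List.foldl_cons]

-- with num_users ≤ 0 no user exists, so the scan never touches the dict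
theorem pv_bstep_nonpos (npc nu : Int) (hnu : nu ≤ 0)
    (d : PySem.Dict Int (PySem.Set Int)) (r : Int) (hr : 0 ≤ r) (p0 : Option Int)
    (y : Int × (Int × Int)) :
    ∃ r' p', pvBStep npc nu (d, r, p0) y = (d, r', p') ∧ 0 ≤ r' := by
  unfold pvBStep
  by_cases hres : p0 ≠ some y.2.2
  · rw [if_pos hres]
    refine ⟨0 + 1, some y.2.2, ?_, by omega⟩
    dsimp only
    by_cases hpos : 0 < npc
    · rw [if_pos hpos, if_neg (by
        rw [PySem.Int.floordiv_eq_ediv_of_pos hpos, Int.zero_ediv]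
        omega)]
    · rw [if_neg hpos]
  · rw [if_neg hres]
    refine ⟨r + 1, p0, ?_, by omega⟩
    dsimp only
    by_cases hpos : 0 < npc
    · rw [if_pos hpos, if_neg (by
        rw [PySem.Int.floordiv_eq_ediv_of_pos hpos]
        have := Int.ediv_nonneg hr (le_of_lt hpos)
        omega)]
    · rw [if_neg hpos]

theorem pv_scan_nonpos_users (npc nu : Int) (hnu : nu ≤ 0) (l : List (Int × (Int × Int)))
    (d : PySem.Dict Int (PySem.Set Int)) (r0 : Int) (hr0 : 0 ≤ r0) (p0 : Option Int) :
    (l.foldl (pvBStep npc nu) (d, r0, p0)).1 = d := by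
  induction l generalizing r0 p0 with
  | nil => rfl
  | cons y t ih =>
      obtain ⟨r', p', hstep, hr'⟩ := pv_bstep_nonpos npc nu hnu d r0 hr0 p0 y
      rw [List.foldl_cons, hstep]
      exact ih r' hr' p'

-- pvSel at rank 0 is the u-th chunk of the bucket's indices
theorem pv_sel_chunk (m U : Nat) (hm : 0 < m) (u : Nat) (hu : u < U)
    (l : List (Int × (Int × Int))) (r : Nat) :
    pvSel m U l r u = ((l.map (fun p => p.1)).drop (u * m - r)).take (min m ((u + 1) * m - r)) := by
  induction l generalizing r with
  | nil => simp [pvSel]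
  | cons y t ih =>
      have hmul : (u + 1) * m = u * m + m := by ring
      have hdm := Nat.div_add_mod r m
      have hmod := Nat.mod_lt r hm
      by_cases hc : r / m = u
      · have hA1 : m * (r / m) = u * m := by rw [hc]; ring
        have hb1 : u * m ≤ r := by omega
        have hb2 : r < u * m + m := by omega
        simp only [pvSel]
        rw [if_pos (⟨hm, hc, hu⟩ : 0 < m ∧ r / m = u ∧ u < U), List.singleton_append,
          ih (r + 1), hmul, List.map_cons]
        rw [Nat.sub_eq_zero_of_le hb1, List.drop_zero]
        have h0 : u * m - (r + 1) = 0 := by omega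
        rw [h0, List.drop_zero]
        obtain ⟨q, hq⟩ : ∃ q, min m (u * m + m - r) = q + 1 := ⟨min m (u * m + m - r) - 1, by omega⟩
        rw [hq, List.take_succ_cons]
        have hq2 : min m (u * m + m - (r + 1)) = q := by omega
        rw [hq2]
      · have hcnd : ¬ (0 < m ∧ r / m = u ∧ u < U) := fun h => hc h.2.1
        by_cases hr : r < u * m
        · simp only [pvSel]
          rw [if_neg hcnd, List.nil_append, ih (r + 1), hmul, List.map_cons]
          have hd : u * m - r = (u * m - (r + 1)) + 1 := by omega
          rw [hd, List.drop_succ_cons]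
          have hmin : min m (u * m + m - r) = m := by omega
          have hmin' : min m (u * m + m - (r + 1)) = m := by omega
          rw [hmin, hmin']
        · have hge : u * m + m ≤ r := by
            by_contra hlt
            apply hc
            have hcomm : m * u = u * m := Nat.mul_comm m u
            have h1 : m * u ≤ r := by omega
            have h2 : r < m * (u + 1) := by
              have h3 : m * (u + 1) = u * m + m := by ring
              omega
            rcases Nat.lt_trichotomy (r / m) u with h3 | h3 | h3
            · exfalso
              have h4 : m * (r / m + 1) ≤ m * u := Nat.mul_le_mul_left m (by omega)
              have h5 : m * (r / m + 1) = m * (r / m) + m := by ring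
              omega
            · exact h3
            · exfalso
              have h4 : m * (u + 1) ≤ m * (r / m) := Nat.mul_le_mul_left m (by omega)
              have h5 : m * (u + 1) = u * m + m := by ring
              omega
          simp only [pvSel]
          rw [if_neg hcnd, List.nil_append, ih (r + 1), hmul, List.map_cons]
          have hmin : min m (u * m + m - r) = 0 := by omega
          have hmin' : min m (u * m + m - (r + 1)) = 0 := by omega
          rw [hmin, hmin']
          simp

-- pvSel is empty when num_per_class is 0
theorem pv_sel_zero (U : Nat) (u : Nat) (l : List (Int × (Int × Int))) (r : Nat) :
    pvSel 0 U l r u = [] := by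
  induction l generalizing r with
  | nil => rfl
  | cons y t ih => simp [pvSel, ih]

-- counting by fold = counting the label-0 filter
theorem pv_count_fold (l : List (Int × Int)) (a : Int) :
    l.foldl (fun acc p => if p.2 == 0 then acc + 1 else acc) a
      = a + ((l.filter (fun p => p.2 == 0)).length : Int) := by
  induction l generalizing a with
  | nil => simp
  | cons p l ih =>
      simp only [List.foldl_cons]
      by_cases h : p.2 = 0
      · rw [if_pos (by simp [h]), List.filter_cons_of_pos (by simp [h]), ih,
          List.length_cons]
        push_cast; ring
      · rw [if_neg (by simp [h]), List.filter_cons_of_neg (by simp [h]), ih]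

-- filter of enumerate has the same length as the filter of the list
theorem pv_length_filter_enumerate (l : List (Int × Int)) (s : Int) :
    ((PySem.List.enumerate l s).filter (fun p => p.2.2 == 0)).length
      = (l.filter (fun p => p.2 == 0)).length := by
  induction l generalizing s with
  | nil => simp [PySem.List.enumerate_nil]
  | cons p l ih =>
      rw [PySem.List.enumerate_cons]
      by_cases h : p.2 = 0
      · rw [List.filter_cons_of_pos (by simp [h]), List.filter_cons_of_pos (by simp [h])]
        simp [ih]
      · rw [List.filter_cons_of_neg (by simpa using h), List.filter_cons_of_neg (by simpa using h)]
        exact ih _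

-- B's port, with its loop body named (definitional)
theorem pv_alt_unfold (dataset : List (Int × Int)) (num_users : Int) :
    dataset_iid_alt dataset num_users =
      (((PySem.List.sorted (PySem.List.enumerate dataset 0) (fun p => p.2.2) false).foldl
        (pvBStep
          (PySem.Int.floordiv
            (dataset.foldl (fun acc p => if p.2 == 0 then acc + 1 else acc) (0 : Int)) num_users)
          num_users)
        ((PySem.List.pyRange 0 num_users 1).foldl
          (fun d u => d.insert u PySem.Set.empty) PySem.Dict.empty, (0 : Int),
          (none : Option Int))).1).items := rfl

-- ===== VERDICT (by name: the statement is the Claim_ definition above) =====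
theorem dataset_iid_spec : Claim_equal_dataset_iid := by
  intro dataset num_users _hDom hPre
  unfold Spec_dataset_iid
  rw [pv_alt_unfold]
  simp only [dataset_iid]
  -- A's grouping pass, characterised
  rw [pv_enumerate_map (fun p : Int × Int => p.2) dataset 0, List.foldl_map]
  dsimp only
  set buckets : PySem.Dict Int (List Int) :=
    (PySem.List.enumerate dataset 0).foldl (fun d p =>
      match d.get? p.2.2 with
      | some l => d.insert p.2.2 (l ++ [p.1])
      | none   => d)
      ((PySem.List.pyRange 0 10 1).foldl (fun d i => d.insert i ([] : List Int)) PySem.Dict.empty)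
    with hbuckets
  have hkeys : buckets.keys = PySem.List.pyRange 0 10 1 := by
    rw [hbuckets, pv_keys_append_fold _,
      PySem.Dict.keys_foldl_insert (f := fun _ _ => ([] : List Int)), PySem.Dict.keys_empty,
      PySem.Set.update_nil_left,
      PySem.Set.ofList_eq_self_of_nodup _ (PySem.List.nodup_pyRange_one 0 10)]
  -- membership facts from Pre_
  have hrange10 : PySem.List.pyRange 0 10 1 = ([0,1,2,3,4,5,6,7,8,9] : List Int) := by decide
  have hmemlab : ∀ p ∈ PySem.List.enumerate dataset 0, p.2.2 ∈ PySem.List.pyRange 0 10 1 := by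
    intro p hp
    have h2 := hPre.1 p.2 (pv_mem_enumerate dataset 0 p hp)
    rw [hrange10]
    have h3 : p.2.2 = 0 ∨ p.2.2 = 1 ∨ p.2.2 = 2 ∨ p.2.2 = 3 ∨ p.2.2 = 4 ∨ p.2.2 = 5 ∨
        p.2.2 = 6 ∨ p.2.2 = 7 ∨ p.2.2 = 8 ∨ p.2.2 = 9 := by omega
    rcases h3 with h|h|h|h|h|h|h|h|h|h <;> simp [h]
  have hcontains : ∀ p ∈ PySem.List.enumerate dataset 0,
      (((PySem.List.pyRange 0 10 1).foldl (fun d i => d.insert i ([] : List Int))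
        PySem.Dict.empty) : PySem.Dict Int (List Int)).contains p.2.2 = true := by
    intro p hp
    rw [PySem.Dict.contains_iff_mem_keys,
      PySem.Dict.keys_foldl_insert (f := fun _ _ => ([] : List Int)), PySem.Dict.keys_empty,
      PySem.Set.update_nil_left,
      PySem.Set.ofList_eq_self_of_nodup _ (PySem.List.nodup_pyRange_one 0 10)]
    exact hmemlab p hp
  -- value of each bucket
  have hbval : ∀ c : Int, buckets.getD c []
      = ((PySem.List.enumerate dataset 0).filter (fun p => p.2.2 == c)).map (fun p => p.1) := by
    intro c
    rw [hbuckets, pv_getD_append_fold _ _ c hcontains,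
      pv_getD_init _ _ (fun c' => PySem.Dict.getD_empty ..) c, List.nil_append]
  -- num_per_class agrees between the two ports
  have hnpc : PySem.Int.floordiv ((buckets.getD 0 []).length : Int) num_users
      = PySem.Int.floordiv
          (dataset.foldl (fun acc p => if p.2 == 0 then acc + 1 else acc) (0 : Int)) num_users := by
    rw [hbval 0, List.length_map, pv_count_fold, pv_length_filter_enumerate]
    simp
  rw [hkeys, ← hnpc]
  set npc : Int := PySem.Int.floordiv ((buckets.getD 0 []).length : Int) num_users with hnpcdef
  -- the sorted scan input is the concatenation of the class buckets
  have hsorted : PySem.List.sorted (PySem.List.enumerate dataset 0) (fun p => p.2.2) false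
      = (PySem.List.pyRange 0 10 1).flatMap
          (fun c => (PySem.List.enumerate dataset 0).filter (fun p => p.2.2 == c)) := by
    refine pv_sorted_eq_flatMap _ _ ?_ _ hmemlab
    rw [hrange10]; decide
  by_cases hnu : num_users ≤ 0
  · -- num_users ≤ 0 (so < 0 by Pre_): both sides are the empty dict's items
    have hU0 : num_users.toNat = 0 := Int.toNat_of_nonpos hnu
    have hr0 : PySem.List.pyRange 0 num_users 1 = [] := by
      rw [PySem.List.pyRange_one]
      simp [hU0]
    rw [hr0]
    simp only [List.foldl_nil]
    rw [pv_scan_nonpos_users npc num_users hnu _ _ 0 (le_refl 0) none]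
  · -- num_users > 0
    rw [Int.not_le] at hnu
    set U : Nat := num_users.toNat with hUdef
    have hU : num_users = (U : Int) := (Int.toNat_of_nonneg (le_of_lt hnu)).symm
    have hnpc0 : 0 ≤ npc := by
      rw [hnpcdef, PySem.Int.floordiv_eq_ediv_of_pos hnu]
      exact Int.ediv_nonneg (Int.natCast_nonneg _) (le_of_lt hnu)
    set m : Nat := npc.toNat with hmdef
    have hm : npc = (m : Int) := (Int.toNat_of_nonneg hnpc0).symm
    have hrangeU : PySem.List.pyRange 0 num_users 1
        = (List.range U).map (fun k : Nat => (k : Int)) := by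
      rw [PySem.List.pyRange_one]
      simp [hUdef]
    have hnodup : ((List.range U).map (fun k : Nat => (k : Int))).Nodup :=
      List.Nodup.map (fun a b h => Int.natCast_inj.mp h) List.nodup_range
    rw [hrangeU]
    -- A's side: collapse the inner class loop, one fresh insert per user
    rw [PySem.List.foldl_congr_mem _ _
      (fun du (user : Int) => du.insert user
        ((PySem.List.pyRange 0 10 1).foldl (fun s c => PySem.Set.update s
          (PySem.List.slice (buckets.getD c []) (some (user * npc)) (some ((user + 1) * npc))))
          PySem.Set.empty))
      PySem.Dict.empty
      (fun du user _ => pv_inner_collapse _ du user _ _)]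
    rw [List.foldl_map (f := fun k : Nat => (k : Int)),
      PySem.Dict.items_foldl_insert_fresh _ _ _ _
        (fun a _ => PySem.Dict.contains_empty _)
        (by simpa using hnodup)]
    -- B's side: initial dict is pvMkD, scan over the concatenated buckets
    have hinit : ((List.range U).map (fun k : Nat => (k : Int))).foldl
        (fun d u => d.insert u PySem.Set.empty) PySem.Dict.empty
        = pvMkD U (fun _ => PySem.Set.empty) := by
      rw [List.foldl_map]; rfl
    rw [hinit, hsorted,
      pv_scan_classes npc num_users m U hm hU _ _
        (fun c p hp => by simpa using (List.mem_filter.mp hp).2)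
        (by rw [hrange10]; decide)
        (fun _ => PySem.Set.empty) 0 none (fun c _ => by simp),
      pv_items_mkD]
    -- both sides are a map over range U; compare pointwise
    rw [show (PySem.Dict.empty : PySem.Dict Int (PySem.Set Int)).items = [] from rfl,
      List.nil_append]
    refine List.map_congr_left ?_
    intro k hk
    have hkU : k < U := List.mem_range.mp hk
    refine congrArg (fun t => ((k : Int), t)) ?_
    refine PySem.List.foldl_congr_mem _ _ _ _ ?_
    intro acc c _
    rw [pv_slice_chunk _ k npc hnpc0, hbval c, ← hmdef]
    rcases Nat.eq_zero_or_pos m with hm0 | hm0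
    · rw [hm0, pv_sel_zero U k _ 0]
      simp
    · rw [pv_sel_chunk m U hm0 k hkU _ 0]
      have h1 : k * m - 0 = k * m := by omega
      have h2 : min m ((k + 1) * m - 0) = m := by
        have h3 : (k + 1) * m = k * m + m := by ring
        omega
      rw [h1, h2]
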